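-- pv_equiv track=rewrite | github.com/ZailiWang/readme_generator | src/readme_generator/crew.py | _pick_primary_markdown
-- ===== SOURCE A (Python) =====
-- from typing import Any, Dict, List, Optional, Type
--
-- def _pick_primary_markdown(files: List[Dict[str, str]]) -> str:
--     if not files:
--         return ""
--     sorted_files = sorted(files, key=lambda x: x.get("path", "").lower())
--     for item in sorted_files:
--         name = item.get("path", "").split("/")[-1].lower()
--         if name in {"readme.md", "reference.md"}:
--             return item.get("content", "") or ""
--     return sorted_files[0].get("content", "") or ""
-- ===== SOURCE B (Python) =====
-- def _pick_primary_markdown(files):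
--     # One linear pass: track the minimum-key matching item and minimum-key item
--     # overall (first seen wins ties, matching the stable sort of A).
--     if not files:
--         return ""
--     best_match = None
--     best_all = None
--     for item in files:
--         key = item.get("path", "").lower()
--         if best_all is None or key < best_all[0]:
--             best_all = (key, item)
--         name = item.get("path", "").split("/")[-1].lower()
--         if name == "readme.md" or name == "reference.md":
--             if best_match is None or key < best_match[0]:
--                 best_match = (key, item)
--     chosen = best_match if best_match is not None else best_all
--     return chosen[1].get("content", "") or ""
-- ===== Notes on version B (the rewrite author's own statement) =====
-- stated objective: alternative
-- what changed: Replaces sort-then-scan with a single linear pass that tracks the first-seen minimum-key matching item and the first-seen minimum-key item overall (strict < preserves the stable sort's tie-breaking).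
import Mathlib
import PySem

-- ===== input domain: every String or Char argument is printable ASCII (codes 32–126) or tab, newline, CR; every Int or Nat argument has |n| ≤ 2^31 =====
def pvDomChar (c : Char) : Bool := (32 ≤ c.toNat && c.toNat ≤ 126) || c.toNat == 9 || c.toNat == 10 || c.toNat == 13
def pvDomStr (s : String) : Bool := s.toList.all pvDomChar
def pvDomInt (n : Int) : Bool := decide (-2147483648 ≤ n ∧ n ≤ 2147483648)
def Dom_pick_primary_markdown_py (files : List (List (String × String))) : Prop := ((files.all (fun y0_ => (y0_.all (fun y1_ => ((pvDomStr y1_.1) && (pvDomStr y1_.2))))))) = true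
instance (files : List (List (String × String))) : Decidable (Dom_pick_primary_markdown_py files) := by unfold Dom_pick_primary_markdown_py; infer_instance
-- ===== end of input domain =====

-- B replaces A's sort-then-scan by one linear pass tracking two running minima (objective: alternative).

-- ===== PORT A =====
-- item.get("path", "")
def pvPath (item : List (String × String)) : String :=
  (PySem.Dict.mk item).getD "path" ""

-- item.get("path", "").split("/")[-1].lower()
def pvName (item : List (String × String)) : String :=
  PySem.Str.lower (PySem.List.pyGetD (((PySem.Str.split? (pvPath item) "/").getD [])) (-1) "")

-- name in {"readme.md", "reference.md"}
def pvIsTarget (name : String) : Bool := name == "readme.md" || name == "reference.md"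

-- item.get("content", "") or ""
def pvContent (item : List (String × String)) : String :=
  let c := (PySem.Dict.mk item).getD "content" ""
  if c = "" then "" else c

-- the key of the sort: x.get("path", "").lower()
def pvKey (item : List (String × String)) : String := PySem.Str.lower (pvPath item)

-- the for-loop of A: first item (in the given order) whose basename matches
def pvPickLoop : List (List (String × String)) → Option String
  | [] => none
  | item :: rest =>
    let name := pvName item
    if pvIsTarget name then some (pvContent item) else pvPickLoop rest

def pick_primary_markdown_py (files : List (List (String × String))) : String :=
  if files = [] then ""
  else
    let sorted_files := PySem.List.sorted files pvKey
    match pvPickLoop sorted_files with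
    | some c => c
    | none =>
      match sorted_files with
      | m :: _ => pvContent m
      | [] => ""

-- ===== PORT B =====
-- one step of B's single pass: update (best_match, best_all)
def pvStep (st : Option (String × List (String × String)) × Option (String × List (String × String)))
    (item : List (String × String)) :
    Option (String × List (String × String)) × Option (String × List (String × String)) :=
  let key := pvKey item
  let bestAll :=
    match st.2 with
    | none => some (key, item)
    | some b => if key < b.1 then some (key, item) else some b
  let bestMatch :=
    if pvIsTarget (pvName item) then
      match st.1 with
      | none => some (key, item)
      | some b => if key < b.1 then some (key, item) else some b
    else st.1
  (bestMatch, bestAll)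

def pick_primary_markdown_py_alt (files : List (List (String × String))) : String :=
  if files = [] then ""
  else
    let st := files.foldl pvStep (none, none)
    match (st.1.orElse (fun _ => st.2)) with
    | some (_, it) => pvContent it
    | none => ""

-- ===== PRECONDITION & SPEC =====
def Spec_pick_primary_markdown_py (files : List (List (String × String))) (out : String) : Prop := out = pick_primary_markdown_py_alt files
instance (files : List (List (String × String))) (out : String) : Decidable (Spec_pick_primary_markdown_py files out) := by unfold Spec_pick_primary_markdown_py; infer_instance

-- ===== CLAIM (what is proved, stated in full; the proofs are below) =====
def Claim_equal_pick_primary_markdown_py : Prop := ∀ (files : List (List (String × String))), Dom_pick_primary_markdown_py files → Spec_pick_primary_markdown_py files (pick_primary_markdown_py files)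

-- ===== LEMMAS AND PROOFS =====

-- the match predicate as a Bool predicate on items
def pvP (it : List (String × String)) : Bool := pvIsTarget (pvName it)

-- head of an insertion step of the stable insertion sort
theorem pv_head_insertBy (x : List (String × String)) (s : List (List (String × String))) :
    (PySem.List.insertBy (fun a b => decide (pvKey a < pvKey b)) x s).head? =
      some (match s.head? with
            | none => x
            | some y => if pvKey x < pvKey y then x else y) := by
  cases s with
  | nil => simp [PySem.List.insertBy]
  | cons y t => by_cases h : pvKey x < pvKey y <;> simp [PySem.List.insertBy, h]

-- find? through an insertion step, given the target list is sorted by key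
theorem pv_find_insertBy (x : List (String × String)) (s : List (List (String × String)))
    (hp : s.Pairwise (fun a b => pvKey a ≤ pvKey b)) :
    (PySem.List.insertBy (fun a b => decide (pvKey a < pvKey b)) x s).find? pvP =
      (match s.find? pvP with
       | none => if pvP x then some x else none
       | some m => if pvP x && decide (pvKey x < pvKey m) then some x else some m) := by
  induction s with
  | nil =>
    cases hx : pvP x <;> simp [PySem.List.insertBy, List.find?, hx]
  | cons y t ih =>
    rw [List.pairwise_cons] at hp
    obtain ⟨hy, ht⟩ := hp
    by_cases hlt : pvKey x < pvKey y
    · have hkey : ∀ m, (y :: t).find? pvP = some m → pvKey x < pvKey m := by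
        intro m hm
        have hmem := List.mem_of_find?_eq_some hm
        rcases List.mem_cons.1 hmem with h | h
        · subst h; exact hlt
        · exact lt_of_lt_of_le hlt (hy m h)
      cases hfind : (y :: t).find? pvP with
      | none =>
        simp [PySem.List.insertBy, hlt, List.find?]
        cases hx : pvP x <;> simp_all [List.find?]
      | some m =>
        have := hkey m hfind
        simp [PySem.List.insertBy, hlt, List.find?]
        cases hx : pvP x <;> simp_all [List.find?]
    · cases hyP : pvP y
      · simp only [PySem.List.insertBy, hlt, decide_false, Bool.false_eq_true, if_false]
        rw [List.find?_cons_of_neg (by simp [hyP]), List.find?_cons_of_neg (by simp [hyP])]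
        exact ih ht
      · simp only [PySem.List.insertBy, hlt, decide_false, Bool.false_eq_true, if_false]
        rw [List.find?_cons_of_pos (by simp [hyP]), List.find?_cons_of_pos (by simp [hyP])]
        simp [hlt]

-- B's single pass computes exactly (first sorted match, head of the sorted list)
theorem pv_fold_invariant (l : List (List (String × String))) :
    l.foldl pvStep (none, none) =
      (((PySem.List.sorted l pvKey).find? pvP).map (fun m => (pvKey m, m)),
       ((PySem.List.sorted l pvKey).head?.map (fun m => (pvKey m, m)))) := by
  induction l using List.reverseRecOn with
  | nil => simp [PySem.List.sorted_eq_foldl_insertBy]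
  | append_singleton l x ih =>
    rw [List.foldl_append, ih]
    rw [PySem.List.sorted_eq_foldl_insertBy (l ++ [x]), List.foldl_append,
      ← PySem.List.sorted_eq_foldl_insertBy l]
    simp only [List.foldl_cons, List.foldl_nil]
    have hp := PySem.List.sorted_pairwise l pvKey
    rw [pv_find_insertBy x _ hp, pv_head_insertBy x]
    cases hfind : (PySem.List.sorted l pvKey).find? pvP with
    | none =>
      cases hh : (PySem.List.sorted l pvKey).head? with
      | none => cases hx : pvP x <;> simp_all [pvStep, pvP]
      | some y =>
        cases hx : pvP x <;> by_cases hk : pvKey x < pvKey y <;>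
          simp_all [pvStep, pvP] <;> split_ifs <;> simp_all
    | some m =>
      have hmem := List.mem_of_find?_eq_some hfind
      have hne : PySem.List.sorted l pvKey ≠ [] := by
        intro h; rw [h] at hmem; exact absurd hmem (List.not_mem_nil)
      obtain ⟨y, t, hyt⟩ := List.exists_cons_of_ne_nil hne
      cases hx : pvP x <;> by_cases hk : pvKey x < pvKey m <;>
        by_cases hk2 : pvKey x < pvKey y <;>
          simp_all [pvStep, pvP] <;> split_ifs <;> simp_all

-- A's for-loop returns the content of the first matching item
theorem pv_pickLoop_eq (s : List (List (String × String))) :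
    pvPickLoop s = (s.find? pvP).map pvContent := by
  induction s with
  | nil => rfl
  | cons y t ih =>
    simp only [pvPickLoop]
    cases hy : pvP y
    · have hy' : pvIsTarget (pvName y) = false := hy
      rw [List.find?_cons_of_neg (by simp [hy]), if_neg (by simp [hy']), ih]
    · have hy' : pvIsTarget (pvName y) = true := hy
      rw [List.find?_cons_of_pos (by simp [hy]), if_pos hy']
      rfl

-- ===== VERDICT (by name: the statement is the Claim_ definition above) =====
theorem pick_primary_markdown_py_spec : Claim_equal_pick_primary_markdown_py := by
  intro files _
  unfold Spec_pick_primary_markdown_py pick_primary_markdown_py pick_primary_markdown_py_alt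
  by_cases hf : files = []
  · simp [hf]
  · simp only [hf, if_false]
    rw [pv_fold_invariant, pv_pickLoop_eq]
    cases hfind : (PySem.List.sorted files pvKey).find? pvP with
    | some m => simp
    | none =>
      have hne : PySem.List.sorted files pvKey ≠ [] := by
        intro h; exact hf ((PySem.List.sorted_eq_nil_iff files pvKey false).1 h)
      obtain ⟨m, t, hmt⟩ := List.exists_cons_of_ne_nil hne
      simp [hmt]
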